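-- pv_equiv track=rewrite | github.com/CalderWhite/LightCycles | Racers/Terminator.py | depthMap
-- ===== SOURCE A (Python) =====
-- def depthMap(r, c, Map, maxDepth):
--     numRows = len(Map)
--     numCols = len(Map[0])
--     tMap = [[0 for i in range(numCols)] for j in range(numRows)]
--
--     for i in range(numRows):
--         for j in range(numCols):
--             if Map[i][j] == 0:
--                 tMap[i][j] = 9999
--             else:
--                 tMap[i][j] = -1
--
--     tMap[r][c] = 0
--     endPoints = [(r, c)]
--     tree = [[(r, c)]]
--     for depth in range(maxDepth):
--         tendPoints = endPoints.copy()
--         endPoints = []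
--         for coord in tendPoints:
--             if 0<=coord[0]+1<numRows:
--                 if tMap[coord[0]+1][coord[1]] > depth+1 and tMap[coord[0]+1][coord[1]] != -1:
--                     tMap[coord[0]+1][coord[1]] = depth+1
--                     endPoints.append((coord[0]+1, coord[1]))
--             if 0<=coord[0]-1<numRows:
--                 if tMap[coord[0]-1][coord[1]] > depth+1 and tMap[coord[0]-1][coord[1]] != -1:
--                     tMap[coord[0]-1][coord[1]] = depth+1
--                     endPoints.append((coord[0]-1, coord[1]))
--             if 0<=coord[1]+1<numCols:
--                 if tMap[coord[0]][coord[1]+1] > depth+1 and tMap[coord[0]][coord[1]+1] != -1: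
--                     tMap[coord[0]][coord[1]+1] = depth+1
--                     endPoints.append((coord[0], coord[1]+1))
--             if 0<=coord[1]-1<numCols:
--                 if tMap[coord[0]][coord[1]-1] > depth+1 and tMap[coord[0]][coord[1]-1] != -1:
--                     tMap[coord[0]][coord[1]-1] = depth+1
--                     endPoints.append((coord[0], coord[1]-1))
--         tree.append(endPoints)
--
--     return tMap, tree
-- ===== SOURCE B (Python) =====
-- def depthMap(r, c, Map, maxDepth):
--     numRows = len(Map)
--     numCols = len(Map[0])
--     tMap = [[9999 if Map[i][j] == 0 else -1 for j in range(numCols)]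
--             for i in range(numRows)]
--     tMap[r][c] = 0
--
--     tree = [[] for _ in range(max(maxDepth, 0) + 1)]
--     queue = [((r, c), 0)]
--     head = 0
--     while head < len(queue):
--         (x, y), d = queue[head]
--         head += 1
--         tree[d].append((x, y))
--         if d < maxDepth:
--             for nx, ny, ok in ((x + 1, y, 0 <= x + 1 < numRows),
--                                (x - 1, y, 0 <= x - 1 < numRows),
--                                (x, y + 1, 0 <= y + 1 < numCols),
--                                (x, y - 1, 0 <= y - 1 < numCols)):
--                 if ok and tMap[nx][ny] > d + 1 and tMap[nx][ny] != -1: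
--                     tMap[nx][ny] = d + 1
--                     queue.append(((nx, ny), d + 1))
--     return tMap, tree
-- ===== Notes on version B (the rewrite author's own statement) =====
-- stated objective: idiomatic
-- what changed: Replaces A's per-depth frontier-list swapping (copy endPoints, rebuild, append a level per loop iteration) by a standard single-pass FIFO queue of (cell, depth) entries that fills a pre-allocated list of tree levels, expanding neighbours via one guarded loop instead of four repeated if-blocks.
import Mathlib
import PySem

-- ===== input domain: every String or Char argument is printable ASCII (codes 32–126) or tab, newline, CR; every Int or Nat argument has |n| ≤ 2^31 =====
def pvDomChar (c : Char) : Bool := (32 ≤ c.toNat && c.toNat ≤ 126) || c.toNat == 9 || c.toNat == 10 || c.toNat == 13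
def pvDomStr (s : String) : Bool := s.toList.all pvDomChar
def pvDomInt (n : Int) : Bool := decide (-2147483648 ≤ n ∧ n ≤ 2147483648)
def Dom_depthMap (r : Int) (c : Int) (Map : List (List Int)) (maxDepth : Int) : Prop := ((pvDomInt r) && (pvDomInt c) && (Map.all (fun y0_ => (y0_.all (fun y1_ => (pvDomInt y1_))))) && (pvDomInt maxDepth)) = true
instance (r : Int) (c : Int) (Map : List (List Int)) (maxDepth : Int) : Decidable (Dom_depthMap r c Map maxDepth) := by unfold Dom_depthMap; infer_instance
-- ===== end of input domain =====

-- B replaces A's per-depth frontier-swapping loops by a single FIFO queue of (cell, depth)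
-- entries over a pre-allocated tree of levels (objective: idiomatic BFS; return value only —
-- neither program mutates its arguments).

-- Shared Python-exact indexing helpers: tMap[i][j] read and write (negative indices wrap).
def pvGet2 (tm : List (List Int)) (i j : Int) : Int :=
  PySem.List.pyGetD (PySem.List.pyGetD tm i []) j 0

def pvSet2 (tm : List (List Int)) (i j : Int) (v : Int) : List (List Int) :=
  PySem.List.pySetD tm i (PySem.List.pySetD (PySem.List.pyGetD tm i []) j v)

-- ===== PORT A =====
-- the repeated four-line neighbour block of A ('if <bounds>: if tMap[..] > depth+1 and tMap[..] != -1: …')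
def relaxA (depth : Int) (st : List (List Int) × List (Int × Int)) (nx ny : Int)
    (ok : Prop) [Decidable ok] : List (List Int) × List (Int × Int) :=
  if ok then
    if pvGet2 st.1 nx ny > depth + 1 ∧ pvGet2 st.1 nx ny ≠ -1 then
      (pvSet2 st.1 nx ny (depth + 1), st.2 ++ [(nx, ny)])
    else st
  else st

-- body of A's 'for coord in tendPoints' loop: the four neighbour blocks in A's order
def depthMapStep (numRows numCols depth : Int)
    (st : List (List Int) × List (Int × Int)) (coord : Int × Int) :
    List (List Int) × List (Int × Int) :=
  let st := relaxA depth st (coord.1 + 1) coord.2 (0 ≤ coord.1 + 1 ∧ coord.1 + 1 < numRows)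
  let st := relaxA depth st (coord.1 - 1) coord.2 (0 ≤ coord.1 - 1 ∧ coord.1 - 1 < numRows)
  let st := relaxA depth st coord.1 (coord.2 + 1) (0 ≤ coord.2 + 1 ∧ coord.2 + 1 < numCols)
  relaxA depth st coord.1 (coord.2 - 1) (0 ≤ coord.2 - 1 ∧ coord.2 - 1 < numCols)

-- body of A's 'for depth in range(maxDepth)' loop
def depthMapOuter (numRows numCols : Int)
    (st : List (List Int) × List (Int × Int) × List (List (Int × Int))) (depth : Int) :
    List (List Int) × List (Int × Int) × List (List (Int × Int)) :=
  let inner := st.2.1.foldl (depthMapStep numRows numCols depth) (st.1, [])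
  (inner.1, inner.2, st.2.2 ++ [inner.2])

def depthMap (r : Int) (c : Int) (Map : List (List Int)) (maxDepth : Int) :
    List (List Int) × (List (List (Int × Int))) :=
  let numRows : Int := PySem.List.len Map
  let numCols : Int := PySem.List.len (PySem.List.pyGetD Map 0 [])
  let tMap : List (List Int) := (List.range numRows.toNat).map (fun (i : Nat) =>
      (List.range numCols.toNat).map (fun (j : Nat) =>
        if PySem.List.pyGetD (PySem.List.pyGetD Map (i : Int) []) (j : Int) 0 = 0 then 9999 else -1))
  let tMap := pvSet2 tMap r c 0
  let st := (PySem.List.pyRange 0 maxDepth 1).foldl (depthMapOuter numRows numCols)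
      (tMap, [(r, c)], [[(r, c)]])
  (st.1, st.2.2)

-- ===== PORT B =====
-- the four neighbour candidates with their per-axis bounds tests, in B's tuple order
def depthMapNbrs (numRows numCols x y : Int) : List (Int × Int × Bool) :=
  [(x + 1, y, decide (0 ≤ x + 1 ∧ x + 1 < numRows)),
   (x - 1, y, decide (0 ≤ x - 1 ∧ x - 1 < numRows)),
   (x, y + 1, decide (0 ≤ y + 1 ∧ y + 1 < numCols)),
   (x, y - 1, decide (0 ≤ y - 1 ∧ y - 1 < numCols))]

-- body of B's 'for nx, ny, ok in …' loop (state: tMap and the queue it appends to)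
def relaxB (d : Nat) (st : List (List Int) × List ((Int × Int) × Nat)) (nb : Int × Int × Bool) :
    List (List Int) × List ((Int × Int) × Nat) :=
  if nb.2.2 && decide (pvGet2 st.1 nb.1 nb.2.1 > (d : Int) + 1)
      && decide (pvGet2 st.1 nb.1 nb.2.1 ≠ -1) then
    (pvSet2 st.1 nb.1 nb.2.1 ((d : Int) + 1), st.2 ++ [((nb.1, nb.2.1), d + 1)])
  else st

-- B's 'while queue' loop; the Nat fuel is ONLY a totality guard: every enqueue strictly
-- lowers a non-negative tMap entry (all ≤ 9999), so pops never exceed 9999·rows·cols + 1.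
def depthMapLoop (numRows numCols maxDepth : Int) :
    Nat → List (List Int) → List (List (Int × Int)) → List ((Int × Int) × Nat) →
    List (List Int) × List (List (Int × Int))
  | 0, tm, tr, _ => (tm, tr)
  | _ + 1, tm, tr, [] => (tm, tr)
  | fuel + 1, tm, tr, ((x, y), d) :: rest =>
    let tr := tr.modify d (fun lvl => lvl ++ [(x, y)])
    if (d : Int) < maxDepth then
      let st := (depthMapNbrs numRows numCols x y).foldl (relaxB d) (tm, rest)
      depthMapLoop numRows numCols maxDepth fuel st.1 tr st.2
    else
      depthMapLoop numRows numCols maxDepth fuel tm tr rest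

def depthMap_alt (r : Int) (c : Int) (Map : List (List Int)) (maxDepth : Int) :
    List (List Int) × (List (List (Int × Int))) :=
  let numRows : Int := PySem.List.len Map
  let numCols : Int := PySem.List.len (PySem.List.pyGetD Map 0 [])
  let tMap : List (List Int) := Map.map (fun row =>
      (List.range numCols.toNat).map (fun (j : Nat) =>
        if PySem.List.pyGetD row (j : Int) 0 = 0 then 9999 else -1))
  let tMap := pvSet2 tMap r c 0
  let tree : List (List (Int × Int)) := List.replicate ((max maxDepth 0).toNat + 1) []
  depthMapLoop numRows numCols maxDepth (9999 * Map.length * numCols.toNat + 1) tMap tree [((r, c), 0)]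

-- ===== PRECONDITION & SPEC =====
-- Pre_ excludes exactly the inputs where the Python A raises (IndexError): empty Map, a row
-- shorter than the first row, or a source index outside Python's wraparound range.
def Pre_depthMap (r : Int) (c : Int) (Map : List (List Int)) (maxDepth : Int) : Prop :=
  Map ≠ [] ∧ (∀ row ∈ Map, Map.headI.length ≤ row.length) ∧
  -(Map.length : Int) ≤ r ∧ r < (Map.length : Int) ∧
  -(Map.headI.length : Int) ≤ c ∧ c < (Map.headI.length : Int)
instance (r : Int) (c : Int) (Map : List (List Int)) (maxDepth : Int) : Decidable (Pre_depthMap r c Map maxDepth) := by unfold Pre_depthMap; infer_instance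

def pvWitness_depthMap : Int × Int × List (List Int) × Int := (0, 0, [[0, 0], [1, 0]], 2)

def Spec_depthMap (r : Int) (c : Int) (Map : List (List Int)) (maxDepth : Int) (out : List (List Int) × (List (List (Int × Int)))) : Prop := out = depthMap_alt r c Map maxDepth
instance (r : Int) (c : Int) (Map : List (List Int)) (maxDepth : Int) (out : List (List Int) × (List (List (Int × Int)))) : Decidable (Spec_depthMap r c Map maxDepth out) := by unfold Spec_depthMap; infer_instance

-- ===== CLAIM (what is proved, stated in full; the proofs are below) =====
def Claim_equal_depthMap : Prop := ∀ (r : Int) (c : Int) (Map : List (List Int)) (maxDepth : Int), Dom_depthMap r c Map maxDepth → Pre_depthMap r c Map maxDepth → Spec_depthMap r c Map maxDepth (depthMap r c Map maxDepth)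

-- ===== LEMMAS AND PROOFS =====

theorem pvWitness_ok :
    Dom_depthMap pvWitness_depthMap.1 pvWitness_depthMap.2.1 pvWitness_depthMap.2.2.1 pvWitness_depthMap.2.2.2 ∧
    Pre_depthMap pvWitness_depthMap.1 pvWitness_depthMap.2.1 pvWitness_depthMap.2.2.1 pvWitness_depthMap.2.2.2 := by
  constructor <;> decide


-- ---------- bridging the two neighbour-block shapes ----------

-- canonical forms of the neighbour block: tMap evolution (pvT) and appended cells (pvN)
def pvT (depth : Int) (tm : List (List Int)) (nx ny : Int) (ok : Prop) [Decidable ok] :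
    List (List Int) :=
  if ok then
    if pvGet2 tm nx ny > depth + 1 ∧ pvGet2 tm nx ny ≠ -1 then pvSet2 tm nx ny (depth + 1) else tm
  else tm

def pvN (depth : Int) (tm : List (List Int)) (nx ny : Int) (ok : Prop) [Decidable ok] :
    List (Int × Int) :=
  if ok then
    if pvGet2 tm nx ny > depth + 1 ∧ pvGet2 tm nx ny ≠ -1 then [(nx, ny)] else []
  else []

theorem relaxA_eq (depth : Int) (st : List (List Int) × List (Int × Int)) (nx ny : Int)
    (ok : Prop) [Decidable ok] :
    relaxA depth st nx ny ok = (pvT depth st.1 nx ny ok, st.2 ++ pvN depth st.1 nx ny ok) := by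
  rcases st with ⟨tm, acc⟩
  unfold relaxA pvT pvN
  split_ifs <;> simp

theorem relaxB_eq (d : Nat) (st : List (List Int) × List ((Int × Int) × Nat)) (nx ny : Int)
    (ok : Prop) [Decidable ok] :
    relaxB d st (nx, ny, decide ok)
      = (pvT ((d : Int)) st.1 nx ny ok,
         st.2 ++ (pvN ((d : Int)) st.1 nx ny ok).map (fun p => (p, d + 1))) := by
  rcases st with ⟨tm, q⟩
  by_cases hok : ok <;>
    by_cases h1 : pvGet2 tm nx ny > (d : Int) + 1 <;>
      by_cases h2 : pvGet2 tm nx ny ≠ -1 <;>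
        simp [relaxB, pvT, pvN, hok, h1, h2]

theorem step_acc (numRows numCols depth : Int) (tm : List (List Int)) (acc : List (Int × Int))
    (co : Int × Int) :
    depthMapStep numRows numCols depth (tm, acc) co
      = ((depthMapStep numRows numCols depth (tm, []) co).1,
         acc ++ (depthMapStep numRows numCols depth (tm, []) co).2) := by
  simp [depthMapStep, relaxA_eq]

theorem nbrsFold_eq (numRows numCols : Int) (d : Nat) (x y : Int) (tm : List (List Int))
    (q : List ((Int × Int) × Nat)) :
    (depthMapNbrs numRows numCols x y).foldl (relaxB d) (tm, q)
      = ((depthMapStep numRows numCols (d : Int) (tm, []) (x, y)).1,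
         q ++ ((depthMapStep numRows numCols (d : Int) (tm, []) (x, y)).2).map (fun p => (p, d + 1))) := by
  simp only [depthMapNbrs, List.foldl]
  rw [relaxB_eq, relaxB_eq, relaxB_eq, relaxB_eq]
  simp [depthMapStep, relaxA_eq]

-- ---------- the queue loop consumes the levels one frontier at a time ----------

theorem loop_nil (numRows numCols maxDepth : Int) (f : Nat) (tm : List (List Int))
    (tr : List (List (Int × Int))) :
    depthMapLoop numRows numCols maxDepth f tm tr [] = (tm, tr) := by
  cases f <;> simp [depthMapLoop]

theorem tree_modify_at {α : Type} (done : List (List α)) (part : List α) (rest : List (List α))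
    (co : α) :
    (done ++ part :: rest).modify done.length (fun lvl => lvl ++ [co])
      = done ++ (part ++ [co]) :: rest := by
  simp [List.modify_eq_set_getElem?]

theorem consume_level (numRows numCols maxDepth : Int) (d : Nat)
    (done : List (List (Int × Int))) (rest : List (List (Int × Int)))
    (hd : (d : Int) < maxDepth) (hlen : done.length = d) :
    ∀ (cur : List (Int × Int)) (tm : List (List Int)) (nxt part : List (Int × Int)) (f : Nat),
    depthMapLoop numRows numCols maxDepth (cur.length + f) tm (done ++ part :: rest)
        (cur.map (fun p => (p, d)) ++ nxt.map (fun p => (p, d + 1)))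
      = depthMapLoop numRows numCols maxDepth f
          (cur.foldl (depthMapStep numRows numCols (d : Int)) (tm, nxt)).1
          (done ++ (part ++ cur) :: rest)
          ((cur.foldl (depthMapStep numRows numCols (d : Int)) (tm, nxt)).2.map (fun p => (p, d + 1))) := by
  subst hlen
  intro cur
  induction cur with
  | nil => intro tm nxt part f; simp
  | cons xy cur' ih =>
    intro tm nxt part f
    rcases xy with ⟨x, y⟩
    have hstep : depthMapLoop numRows numCols maxDepth (cur'.length + f + 1) tm
        (done ++ part :: rest)
        (((x, y), done.length) :: (cur'.map (fun p => (p, done.length)) ++ nxt.map (fun p => (p, done.length + 1))))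
        = depthMapLoop numRows numCols maxDepth (cur'.length + f)
            ((depthMapNbrs numRows numCols x y).foldl (relaxB done.length)
              (tm, cur'.map (fun p => (p, done.length)) ++ nxt.map (fun p => (p, done.length + 1)))).1
            ((done ++ part :: rest).modify done.length (fun lvl => lvl ++ [(x, y)]))
            ((depthMapNbrs numRows numCols x y).foldl (relaxB done.length)
              (tm, cur'.map (fun p => (p, done.length)) ++ nxt.map (fun p => (p, done.length + 1)))).2 := by
      simp [depthMapLoop, hd]
    have hq : (((x, y), done.length) :: (cur'.map (fun p => (p, done.length)) ++ nxt.map (fun p => (p, done.length + 1))))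
        = ((x, y) :: cur').map (fun p => (p, done.length)) ++ nxt.map (fun p => (p, done.length + 1)) := by simp
    have hlen2 : ((x, y) :: cur').length + f = cur'.length + f + 1 := by
      simp [List.length_cons]; omega
    rw [hlen2, ← hq, hstep]
    rw [nbrsFold_eq]
    rw [tree_modify_at]
    have hq2 : (cur'.map (fun p => (p, done.length)) ++ nxt.map (fun p => (p, done.length + 1)))
          ++ ((depthMapStep numRows numCols (done.length : Int) (tm, []) (x, y)).2).map (fun p => (p, done.length + 1))
        = cur'.map (fun p => (p, done.length))
          ++ (nxt ++ (depthMapStep numRows numCols (done.length : Int) (tm, []) (x, y)).2).map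
              (fun p => (p, done.length + 1)) := by
      simp
    rw [hq2]
    rw [ih (depthMapStep numRows numCols (done.length : Int) (tm, []) (x, y)).1
        (nxt ++ (depthMapStep numRows numCols (done.length : Int) (tm, []) (x, y)).2) (part ++ [(x, y)]) f]
    have hfold : ((x, y) :: cur').foldl (depthMapStep numRows numCols (done.length : Int)) (tm, nxt)
        = cur'.foldl (depthMapStep numRows numCols (done.length : Int))
            ((depthMapStep numRows numCols (done.length : Int) (tm, []) (x, y)).1,
             nxt ++ (depthMapStep numRows numCols (done.length : Int) (tm, []) (x, y)).2) := by
      simp only [List.foldl]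
      rw [step_acc]
    rw [hfold]
    simp

theorem drain_level (numRows numCols maxDepth : Int) (d : Nat)
    (done : List (List (Int × Int))) (rest : List (List (Int × Int)))
    (hd : ¬ (d : Int) < maxDepth) (hlen : done.length = d) :
    ∀ (cur : List (Int × Int)) (tm : List (List Int)) (part : List (Int × Int)) (f : Nat),
    depthMapLoop numRows numCols maxDepth (cur.length + f) tm (done ++ part :: rest)
        (cur.map (fun p => (p, d)))
      = (tm, done ++ (part ++ cur) :: rest) := by
  subst hlen
  intro cur
  induction cur with
  | nil => intro tm part f; simp [loop_nil]
  | cons xy cur' ih =>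
    intro tm part f
    rcases xy with ⟨x, y⟩
    have hlen2 : ((x, y) :: cur').length + f = cur'.length + f + 1 := by
      simp [List.length_cons]; omega
    rw [hlen2]
    have hstep : depthMapLoop numRows numCols maxDepth (cur'.length + f + 1) tm
        (done ++ part :: rest) ((((x, y), done.length)) :: cur'.map (fun p => (p, done.length)))
        = depthMapLoop numRows numCols maxDepth (cur'.length + f) tm
            ((done ++ part :: rest).modify done.length (fun lvl => lvl ++ [(x, y)]))
            (cur'.map (fun p => (p, done.length))) := by
      simp [depthMapLoop, hd]
    simp only [List.map_cons]
    rw [hstep, tree_modify_at]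
    rw [ih tm (part ++ [(x, y)]) f]
    simp


-- ---------- A's run, restated as structural recursion on the number of levels ----------

def pvLvl (numRows numCols : Int) (d : Nat) (tm : List (List Int)) (eps : List (Int × Int)) :
    List (List Int) × List (Int × Int) :=
  eps.foldl (depthMapStep numRows numCols (d : Int)) (tm, [])

def pvTail (numRows numCols : Int) :
    Nat → Nat → List (List Int) → List (Int × Int) → List (List Int) × List (List (Int × Int))
  | 0, _, tm, eps => (tm, [eps])
  | k + 1, d, tm, eps =>
    ((pvTail numRows numCols k (d + 1) (pvLvl numRows numCols d tm eps).1
        (pvLvl numRows numCols d tm eps).2).1,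
     eps :: (pvTail numRows numCols k (d + 1) (pvLvl numRows numCols d tm eps).1
        (pvLvl numRows numCols d tm eps).2).2)

def pvFuel (numRows numCols : Int) :
    Nat → Nat → List (List Int) → List (Int × Int) → Nat
  | 0, _, _, eps => eps.length
  | k + 1, d, tm, eps =>
    eps.length + pvFuel numRows numCols k (d + 1) (pvLvl numRows numCols d tm eps).1
        (pvLvl numRows numCols d tm eps).2

theorem pvTail_snd_head (numRows numCols : Int) (k d : Nat) (tm : List (List Int))
    (eps : List (Int × Int)) :
    (pvTail numRows numCols k d tm eps).2
      = eps :: (pvTail numRows numCols k d tm eps).2.tail := by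
  cases k <;> simp [pvTail]

-- B's queue loop, on enough fuel, computes A's level recursion
theorem loop_levels (numRows numCols maxDepth : Int) :
    ∀ (k d : Nat) (tm : List (List Int)) (eps : List (Int × Int))
      (done : List (List (Int × Int))) (f : Nat),
    k = (maxDepth - (d : Int)).toNat → done.length = d →
    depthMapLoop numRows numCols maxDepth (pvFuel numRows numCols k d tm eps + f) tm
        (done ++ [] :: List.replicate k []) (eps.map (fun p => (p, d)))
      = ((pvTail numRows numCols k d tm eps).1, done ++ (pvTail numRows numCols k d tm eps).2) := by
  intro k
  induction k with
  | zero =>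
    intro d tm eps done f hk hlen
    have hd : ¬ (d : Int) < maxDepth := by omega
    have h := drain_level numRows numCols maxDepth d done [] hd hlen eps tm [] f
    simpa [pvFuel, pvTail] using h
  | succ k ih =>
    intro d tm eps done f hk hlen
    have hd : (d : Int) < maxDepth := by omega
    have h := consume_level numRows numCols maxDepth d done (List.replicate (k + 1) []) hd hlen
        eps tm [] [] (pvFuel numRows numCols k (d + 1) (pvLvl numRows numCols d tm eps).1
          (pvLvl numRows numCols d tm eps).2 + f)
    simp only [List.map_nil, List.append_nil] at h
    have hfuel : pvFuel numRows numCols (k + 1) d tm eps + f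
        = eps.length + (pvFuel numRows numCols k (d + 1) (pvLvl numRows numCols d tm eps).1
            (pvLvl numRows numCols d tm eps).2 + f) := by
      simp [pvFuel]; omega
    rw [hfuel, h]
    have htr : done ++ ([] ++ eps) :: List.replicate (k + 1) []
        = (done ++ [eps]) ++ [] :: List.replicate k [] := by
      simp [List.replicate_succ]
    rw [htr]
    rw [show List.foldl (depthMapStep numRows numCols (d : Int)) (tm, []) eps
        = pvLvl numRows numCols d tm eps from rfl]
    rw [ih (d + 1) (pvLvl numRows numCols d tm eps).1 (pvLvl numRows numCols d tm eps).2
        (done ++ [eps]) f (by push_cast; omega) (by simp [hlen])]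
    simp [pvTail, pvLvl]

-- A's pyRange fold computes the same level recursion
theorem fold_levels (numRows numCols maxDepth : Int) :
    ∀ (k d : Nat) (tm : List (List Int)) (eps : List (Int × Int))
      (trP : List (List (Int × Int))),
    k = (maxDepth - (d : Int)).toNat →
    ((PySem.List.pyRange (d : Int) maxDepth 1).foldl (depthMapOuter numRows numCols)
        (tm, eps, trP)).1 = (pvTail numRows numCols k d tm eps).1 ∧
    ((PySem.List.pyRange (d : Int) maxDepth 1).foldl (depthMapOuter numRows numCols)
        (tm, eps, trP)).2.2 = trP ++ (pvTail numRows numCols k d tm eps).2.tail := by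
  intro k
  induction k with
  | zero =>
    intro d tm eps trP hk
    rw [PySem.List.pyRange_one_eq_nil (by omega)]
    simp [pvTail]
  | succ k ih =>
    intro d tm eps trP hk
    have hd : (d : Int) < maxDepth := by omega
    rw [PySem.List.pyRange_one_cons hd]
    rw [List.foldl_cons]
    have hred : depthMapOuter numRows numCols (tm, eps, trP) ((d : Nat) : Int)
        = ((pvLvl numRows numCols d tm eps).1, (pvLvl numRows numCols d tm eps).2,
           trP ++ [(pvLvl numRows numCols d tm eps).2]) := rfl
    rw [hred]
    rw [show (d : Int) + 1 = ((d + 1 : Nat) : Int) from by push_cast; ring]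
    have h := ih (d + 1) (pvLvl numRows numCols d tm eps).1 (pvLvl numRows numCols d tm eps).2
        (trP ++ [(pvLvl numRows numCols d tm eps).2]) (by push_cast; omega)
    refine ⟨h.1.trans (by simp [pvTail]), h.2.trans ?_⟩
    rw [show (pvTail numRows numCols (k + 1) d tm eps).2.tail
        = (pvTail numRows numCols k (d + 1) (pvLvl numRows numCols d tm eps).1
            (pvLvl numRows numCols d tm eps).2).2 from by simp [pvTail]]
    rw [pvTail_snd_head numRows numCols k (d + 1)]
    simp


-- ---------- fuel sufficiency: every enqueue strictly lowers a non-negative tMap entry ----------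

def pvPhi (tm : List (List Int)) : Nat := (tm.map (fun row => (row.map Int.toNat).sum)).sum

def pvShape (nR nC : Nat) (tm : List (List Int)) : Prop :=
  tm.length = nR ∧ ∀ row ∈ tm, row.length = nC

def pvValid (nR nC : Nat) (p : Int × Int) : Prop :=
  -(nR : Int) ≤ p.1 ∧ p.1 < (nR : Int) ∧ -(nC : Int) ≤ p.2 ∧ p.2 < (nC : Int)

theorem sum_map_set {α : Type} (g : α → Nat) :
    ∀ (xs : List α) (n : Nat) (v : α) (h : n < xs.length),
    ((xs.set n v).map g).sum + g (xs[n]'h) = (xs.map g).sum + g v := by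
  intro xs
  induction xs with
  | nil => intro n v h; simp at h
  | cons a l ih =>
    intro n v h
    cases n with
    | zero => simp; omega
    | succ m =>
      have hm : m < l.length := by simpa using h
      have := ih m v hm
      simp only [List.set_cons_succ, List.map_cons, List.sum_cons, List.getElem_cons_succ]
      omega

theorem wrap_spec {α : Type} (xs : List α) (i : Int) (d : α) (v : α)
    (h : PySem.Raise.InRange xs.length i) :
    ∃ n, ∃ (hn : n < xs.length),
      PySem.List.pySetD xs i v = xs.set n v ∧ PySem.List.pyGetD xs i d = xs[n]'hn := by
  rcases h with ⟨h1, h2⟩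
  by_cases h0 : 0 ≤ i
  · refine ⟨i.toNat, by omega, ?_, ?_⟩
    · exact PySem.List.pySetD_of_nonneg xs v h0
    · exact PySem.List.pyGetD_eq_getElem xs d h0 (by simpa using h2)
  · refine ⟨(i + xs.length).toNat, by omega, ?_, ?_⟩
    · simp only [PySem.List.pySetD, PySem.List.pySet?, PySem.List.pyIdx?]
      rw [if_neg h0, if_pos h1]
      simp only [Option.map_some, Option.getD_some]
      congr 1
      omega
    · simp only [PySem.List.pyGetD, PySem.List.pyGet?, PySem.List.pyIdx?]
      rw [if_neg h0, if_pos h1]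
      simp only [Option.bind_some]
      rw [List.getElem?_eq_getElem (by omega)]
      simp only [Option.getD_some]
      congr 1
      omega

theorem set2_spec (nR nC : Nat) (tm : List (List Int)) (i j v : Int)
    (hs : pvShape nR nC tm) (hij : pvValid nR nC (i, j)) :
    pvShape nR nC (pvSet2 tm i j v) ∧
    pvPhi (pvSet2 tm i j v) + (pvGet2 tm i j).toNat = pvPhi tm + v.toNat := by
  obtain ⟨hlen, hrows⟩ := hs
  obtain ⟨hi1, hi2, hj1, hj2⟩ := hij
  obtain ⟨n, hn, hsetn, hgetn⟩ := wrap_spec tm i ([] : List Int) (PySem.List.pySetD (PySem.List.pyGetD tm i []) j v) (by constructor <;> rw [hlen] <;> omega)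
  have hrowlen : (tm[n]'hn).length = nC := hrows _ (List.getElem_mem hn)
  obtain ⟨m, hm, hsetm, hgetm⟩ := wrap_spec (tm[n]'hn) j (0 : Int) v
      (by rw [hrowlen]; constructor <;> omega)
  constructor
  · constructor
    · rw [pvSet2, hsetn, hgetn, hsetm]
      simpa using hlen
    · intro row hrow
      rw [pvSet2, hsetn, hgetn, hsetm] at hrow
      rcases List.mem_or_eq_of_mem_set hrow with h | h
      · exact hrows _ h
      · rw [h]; simp [hrowlen]
  · rw [pvSet2, hsetn, hgetn, hsetm, pvGet2, hgetn, hgetm]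
    have houter := sum_map_set (fun row => (row.map Int.toNat).sum) tm n ((tm[n]'hn).set m v) hn
    have hinner := sum_map_set Int.toNat (tm[n]'hn) m v hm
    unfold pvPhi
    omega

-- the canonical neighbour block preserves shape, pays one Φ unit per appended cell
theorem pvTN_inv (nR nC : Nat) (depth : Int) (tm : List (List Int)) (nx ny : Int)
    (ok : Prop) [Decidable ok] (hs : pvShape nR nC tm) (hok : ok → pvValid nR nC (nx, ny))
    (hdp : 0 ≤ depth) :
    pvShape nR nC (pvT depth tm nx ny ok) ∧
    pvPhi (pvT depth tm nx ny ok) + (pvN depth tm nx ny ok).length ≤ pvPhi tm ∧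
    (∀ p ∈ pvN depth tm nx ny ok, p = (nx, ny)) := by
  unfold pvT pvN
  split_ifs with h1 h2
  · obtain ⟨hsh, hphi⟩ := set2_spec nR nC tm nx ny (depth + 1) hs (hok h1)
    have hlt : (depth + 1).toNat < (pvGet2 tm nx ny).toNat := by omega
    refine ⟨hsh, ?_, by simp⟩
    simp only [List.length_cons, List.length_nil]
    omega
  · exact ⟨hs, by simp, by simp⟩
  · exact ⟨hs, by simp, by simp⟩

theorem pvN_mem' (depth : Int) (tm : List (List Int)) (nx ny : Int)
    (ok : Prop) [Decidable ok] {p : Int × Int} (hp : p ∈ pvN depth tm nx ny ok) :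
    ok ∧ p = (nx, ny) := by
  unfold pvN at hp
  split_ifs at hp with h1 h2 <;> simp_all

theorem step_inv (nR nC : Nat) (d : Nat) (tm : List (List Int)) (x y : Int)
    (hs : pvShape nR nC tm) (hv : pvValid nR nC (x, y)) :
    pvShape nR nC (depthMapStep (nR : Int) (nC : Int) (d : Int) (tm, []) (x, y)).1 ∧
    pvPhi (depthMapStep (nR : Int) (nC : Int) (d : Int) (tm, []) (x, y)).1
        + (depthMapStep (nR : Int) (nC : Int) (d : Int) (tm, []) (x, y)).2.length
      ≤ pvPhi tm ∧
    (∀ p ∈ (depthMapStep (nR : Int) (nC : Int) (d : Int) (tm, []) (x, y)).2, pvValid nR nC p) := by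
  obtain ⟨hx1, hx2, hy1, hy2⟩ := hv
  have hdp : (0 : Int) ≤ (d : Int) := by positivity
  have i1 := pvTN_inv nR nC (d : Int) tm (x + 1) y (0 ≤ x + 1 ∧ x + 1 < (nR : Int))
      hs (fun h => ⟨by omega, by omega, by simpa using hy1, by simpa using hy2⟩) hdp
  have i2 := pvTN_inv nR nC (d : Int) _ (x - 1) y (0 ≤ x - 1 ∧ x - 1 < (nR : Int))
      i1.1 (fun h => ⟨by omega, by omega, by simpa using hy1, by simpa using hy2⟩) hdp
  have i3 := pvTN_inv nR nC (d : Int) _ x (y + 1) (0 ≤ y + 1 ∧ y + 1 < (nC : Int))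
      i2.1 (fun h => ⟨by simpa using hx1, by simpa using hx2, by omega, by omega⟩) hdp
  have i4 := pvTN_inv nR nC (d : Int) _ x (y - 1) (0 ≤ y - 1 ∧ y - 1 < (nC : Int))
      i3.1 (fun h => ⟨by simpa using hx1, by simpa using hx2, by omega, by omega⟩) hdp
  refine ⟨?_, ?_, ?_⟩
  · simpa [depthMapStep, relaxA_eq] using i4.1
  · have h1 := i1.2.1; have h2 := i2.2.1; have h3 := i3.2.1; have h4 := i4.2.1
    simp only [depthMapStep, relaxA_eq, List.nil_append, List.append_assoc, List.length_append]
    omega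
  · intro p hp
    simp only [depthMapStep, relaxA_eq, List.nil_append, List.append_assoc,
      List.mem_append] at hp
    rcases hp with h | h | h | h <;>
      (obtain ⟨hok, rfl⟩ := pvN_mem' _ _ _ _ _ h
       exact ⟨by omega, by omega, by omega, by omega⟩)

theorem lvl_inv (nR nC : Nat) (d : Nat) :
    ∀ (cur : List (Int × Int)) (tm : List (List Int)) (acc : List (Int × Int)),
    pvShape nR nC tm → (∀ p ∈ cur, pvValid nR nC p) → (∀ p ∈ acc, pvValid nR nC p) →
    pvShape nR nC (cur.foldl (depthMapStep (nR : Int) (nC : Int) (d : Int)) (tm, acc)).1 ∧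
    pvPhi (cur.foldl (depthMapStep (nR : Int) (nC : Int) (d : Int)) (tm, acc)).1
        + (cur.foldl (depthMapStep (nR : Int) (nC : Int) (d : Int)) (tm, acc)).2.length
      ≤ pvPhi tm + acc.length ∧
    (∀ p ∈ (cur.foldl (depthMapStep (nR : Int) (nC : Int) (d : Int)) (tm, acc)).2,
      pvValid nR nC p) := by
  intro cur
  induction cur with
  | nil => intro tm acc hs _ hacc; exact ⟨hs, by simp, hacc⟩
  | cons xy cur' ih =>
    intro tm acc hs hcur hacc
    rcases xy with ⟨x, y⟩
    have hstep := step_inv nR nC d tm x y hs (hcur _ (by simp))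
    rw [List.foldl_cons, step_acc]
    have := ih (depthMapStep (nR : Int) (nC : Int) (d : Int) (tm, []) (x, y)).1
        (acc ++ (depthMapStep (nR : Int) (nC : Int) (d : Int) (tm, []) (x, y)).2)
        hstep.1 (fun p hp => hcur p (by simp [hp]))
        (fun p hp => by
          rcases List.mem_append.mp hp with h | h
          · exact hacc p h
          · exact hstep.2.2 p h)
    refine ⟨this.1, ?_, this.2.2⟩
    have h2 := this.2.1
    have h3 := hstep.2.1
    simp at h2 ⊢
    omega

theorem fuel_le (nR nC : Nat) :
    ∀ (k d : Nat) (tm : List (List Int)) (eps : List (Int × Int)),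
    pvShape nR nC tm → (∀ p ∈ eps, pvValid nR nC p) →
    pvFuel (nR : Int) (nC : Int) k d tm eps ≤ eps.length + pvPhi tm := by
  intro k
  induction k with
  | zero => intro d tm eps _ _; simp [pvFuel]
  | succ k ih =>
    intro d tm eps hs heps
    have hl := lvl_inv nR nC d eps tm [] hs heps (by simp)
    have := ih (d + 1) (pvLvl (nR : Int) (nC : Int) d tm eps).1
        (pvLvl (nR : Int) (nC : Int) d tm eps).2 hl.1 hl.2.2
    have h2 := hl.2.1
    simp only [pvFuel, pvLvl, List.length_nil] at *
    omega


-- ---------- the two grid initialisations agree; the initial Φ is bounded ----------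

theorem init_map_eq {β : Type} (L : List (List Int)) (f : List Int → β) :
    (List.range L.length).map (fun (i : Nat) => f (PySem.List.pyGetD L (i : Int) [])) = L.map f := by
  apply List.ext_getElem (by simp)
  intro i h1 h2
  simp only [List.getElem_map, List.getElem_range, PySem.List.pyGetD_natCast]
  rw [List.getD_eq_getElem L [] (by simpa using h2)]


theorem init_shape (nCn : Nat) (Map : List (List Int)) :
    pvShape Map.length nCn (Map.map (fun row =>
      (List.range nCn).map (fun (j : Nat) =>
        if PySem.List.pyGetD row (j : Int) 0 = 0 then 9999 else -1))) := by
  constructor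
  · simp
  · intro row hrow
    simp only [List.mem_map] at hrow
    obtain ⟨a, _, h⟩ := hrow
    simp [← h]

theorem init_phi (nCn : Nat) (Map : List (List Int)) :
    pvPhi (Map.map (fun row =>
      (List.range nCn).map (fun (j : Nat) =>
        if PySem.List.pyGetD row (j : Int) 0 = 0 then 9999 else -1)))
      ≤ 9999 * Map.length * nCn := by
  unfold pvPhi
  have hrow : ∀ row ∈ (Map.map (fun row =>
      (List.range nCn).map (fun (j : Nat) =>
        if PySem.List.pyGetD row (j : Int) 0 = 0 then 9999 else -1))).map
        (fun row => (row.map Int.toNat).sum), row ≤ nCn * 9999 := by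
    intro s hs
    simp only [List.mem_map] at hs
    obtain ⟨a, ⟨row, _, ha⟩, hsum⟩ := hs
    rw [← hsum, ← ha]
    have := List.sum_le_card_nsmul (((List.range nCn).map (fun (j : Nat) =>
        if PySem.List.pyGetD row (j : Int) 0 = 0 then (9999 : Int) else -1)).map Int.toNat) 9999
      (by intro x hx
          simp only [List.mem_map] at hx
          obtain ⟨b, ⟨a2, _, hb2⟩, hbx⟩ := hx
          rw [← hbx, ← hb2]
          split_ifs <;> simp)
    simpa [smul_eq_mul] using this
  have := List.sum_le_card_nsmul _ _ hrow
  simp only [smul_eq_mul, List.length_map] at this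
  calc _ ≤ Map.length * (nCn * 9999) := this
    _ = 9999 * Map.length * nCn := by ring

-- ===== VERDICT (by name: the statement is the Claim_ definition above) =====
theorem depthMap_spec : Claim_equal_depthMap := by
  intro r c Map maxDepth hDom hPre
  obtain ⟨hne, hrows, hr1, hr2, hc1, hc2⟩ := hPre
  unfold Spec_depthMap
  have hlen : PySem.List.len Map = (Map.length : Int) := by simp [PySem.List.len_eq]
  have hhead : PySem.List.pyGetD Map 0 [] = Map.headI := by
    cases Map with
    | nil => exact absurd rfl hne
    | cons a t => simp [PySem.List.pyGetD_zero]
  have hlen2 : PySem.List.len Map.headI = (Map.headI.length : Int) := by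
    simp [PySem.List.len_eq]
  set nRn := Map.length with hnR
  set nCn := Map.headI.length with hnC
  set tm0 : List (List Int) := Map.map (fun row =>
      (List.range nCn).map (fun (j : Nat) =>
        if PySem.List.pyGetD row (j : Int) 0 = 0 then 9999 else -1)) with htm0
  set tm1 := pvSet2 tm0 r c 0 with htm1
  -- both ports start from the same tMap
  have hA : depthMap r c Map maxDepth
      = (((PySem.List.pyRange 0 maxDepth 1).foldl (depthMapOuter (nRn : Int) (nCn : Int))
          (tm1, [(r, c)], [[(r, c)]])).1,
         ((PySem.List.pyRange 0 maxDepth 1).foldl (depthMapOuter (nRn : Int) (nCn : Int))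
          (tm1, [(r, c)], [[(r, c)]])).2.2) := by
    simp only [depthMap, hlen, hhead, hlen2, Int.toNat_natCast]
    rw [init_map_eq Map (fun row => (List.range nCn).map (fun (j : Nat) =>
        if PySem.List.pyGetD row (j : Int) 0 = 0 then 9999 else -1))]
  have hB : depthMap_alt r c Map maxDepth
      = depthMapLoop (nRn : Int) (nCn : Int) maxDepth (9999 * nRn * nCn + 1) tm1
          (List.replicate (maxDepth.toNat + 1) []) [((r, c), 0)] := by
    simp only [depthMap_alt, hlen, hhead, hlen2, Int.toNat_natCast]
    rw [show (max maxDepth 0).toNat = maxDepth.toNat from by omega]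
  -- shape, validity, fuel bound
  have hshape0 : pvShape nRn nCn tm0 := init_shape nCn Map
  have hvalid : pvValid nRn nCn (r, c) := ⟨hr1, hr2, hc1, hc2⟩
  have hset := set2_spec nRn nCn tm0 r c 0 hshape0 hvalid
  have hshape1 : pvShape nRn nCn tm1 := hset.1
  have hphi1 : pvPhi tm1 ≤ pvPhi tm0 := by
    have h := hset.2
    rw [← htm1] at h
    omega
  have hphi0 : pvPhi tm0 ≤ 9999 * nRn * nCn := init_phi nCn Map
  have hfuel := fuel_le nRn nCn maxDepth.toNat 0 tm1 [(r, c)] hshape1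
      (by intro p hp; simp only [List.mem_singleton] at hp; rw [hp]; exact hvalid)
  have hfuelle : pvFuel (nRn : Int) (nCn : Int) maxDepth.toNat 0 tm1 [(r, c)]
      ≤ 9999 * nRn * nCn + 1 := by
    simp only [List.length_singleton] at hfuel
    omega
  obtain ⟨f0, hf0⟩ : ∃ f0, 9999 * nRn * nCn + 1
      = pvFuel (nRn : Int) (nCn : Int) maxDepth.toNat 0 tm1 [(r, c)] + f0 :=
    ⟨_, (Nat.add_sub_cancel' hfuelle).symm⟩
  have hk0 : maxDepth.toNat = (maxDepth - ((0 : Nat) : Int)).toNat := by simp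
  -- run both programs
  have hloop := loop_levels (nRn : Int) (nCn : Int) maxDepth maxDepth.toNat 0 tm1 [(r, c)]
      [] f0 hk0 rfl
  have hfold := fold_levels (nRn : Int) (nCn : Int) maxDepth maxDepth.toNat 0 tm1 [(r, c)]
      [[(r, c)]] hk0
  simp only [List.nil_append, List.map_cons, List.map_nil] at hloop
  try simp only [Nat.cast_zero] at hloop
  try simp only [Nat.cast_zero] at hfold
  rw [hA, hB]
  rw [show List.replicate (maxDepth.toNat + 1) ([] : List (Int × Int))
      = [] :: List.replicate maxDepth.toNat [] from rfl]
  rw [hf0, hloop]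
  have hhd := pvTail_snd_head (nRn : Int) (nCn : Int) maxDepth.toNat 0 tm1 [(r, c)]
  exact Prod.ext hfold.1 (by rw [hfold.2, hhd]; simp)
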